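-- pv_equiv track=rewrite | github.com/the1schwartz/aoc2022 | day15/day15.py | possibleBeaonPositions
-- ===== SOURCE A (Python) =====
-- def possibleBeaonPositions(sensorsWithClosestBeacon, map, y, minX, maxX):
--     result = []
--
--     x = minX
--     while x <= maxX:
--         pos = (x, y)
--         possiblePosition = True
--
--         for entry in sensorsWithClosestBeacon:
--             sensor = entry[0]
--             manhattanDistance = abs(
--                 sensor[0] - pos[0]) + abs(sensor[1] - pos[1])
--             dist = entry[2]
--             possiblePosition = possiblePosition and manhattanDistance > dist and pos not in map
--
--             if not possiblePosition:
--                 break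
--
--         if possiblePosition:
--             result.append(pos)
--         else:
--             for entry in sensorsWithClosestBeacon:
--                 sensor = entry[0]
--                 manhattanDistance = abs(
--                     sensor[0] - pos[0]) + abs(sensor[1] - pos[1])
--                 dist = entry[2]
--                 if manhattanDistance <= dist and pos not in map:
--                     xDiff = x - sensor[0]
--                     yDiff = y - sensor[1]
--                     x += dist - abs(yDiff) - xDiff
--                     break
--
--         x += 1
--
--     return result
-- ===== SOURCE B (Python) =====
-- def possibleBeaonPositions(sensorsWithClosestBeacon, map, y, minX, maxX):
--     # Collect each sensor's covered x-interval on row y, clipped to [minX, maxX].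
--     intervals = []
--     for entry in sensorsWithClosestBeacon:
--         sensor = entry[0]
--         span = entry[2] - abs(sensor[1] - y)
--         lo = max(sensor[0] - span, minX)
--         hi = min(sensor[0] + span, maxX)
--         if span >= 0 and lo <= hi:
--             intervals.append((lo, hi))
--     intervals.sort()
--     # Sweep the sorted intervals, emitting the uncovered gaps (minus known map points).
--     result = []
--     x = minX
--     for lo, hi in intervals:
--         if lo > x:
--             for i in range(x, lo):
--                 if (i, y) not in map:
--                     result.append((i, y))
--         if hi + 1 > x:
--             x = hi + 1
--     for i in range(x, maxX + 1):
--         if (i, y) not in map: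
--             result.append((i, y))
--     return result
-- ===== Notes on version B (the rewrite author's own statement) =====
-- stated objective: alternative
-- what changed: Instead of scanning every x in [minX,maxX] and re-checking all sensors per position, B computes each sensor's covered x-interval on row y, sorts the clipped intervals once, and emits the uncovered gaps in a single sweep.
-- intended difference: When sensorsWithClosestBeacon is empty and map contains a point (x,y) with minX<=x<=maxX, A's per-sensor loop never runs so it returns every position including known map points, while B still excludes map points, which is the intended behaviour (known beacons/sensors are not possible beacon positions). — e.g. on possibleBeaonPositions([], [(0, 0)], 0, 0, 0): A returns [(0, 0)], B returns []
import Mathlib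
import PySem

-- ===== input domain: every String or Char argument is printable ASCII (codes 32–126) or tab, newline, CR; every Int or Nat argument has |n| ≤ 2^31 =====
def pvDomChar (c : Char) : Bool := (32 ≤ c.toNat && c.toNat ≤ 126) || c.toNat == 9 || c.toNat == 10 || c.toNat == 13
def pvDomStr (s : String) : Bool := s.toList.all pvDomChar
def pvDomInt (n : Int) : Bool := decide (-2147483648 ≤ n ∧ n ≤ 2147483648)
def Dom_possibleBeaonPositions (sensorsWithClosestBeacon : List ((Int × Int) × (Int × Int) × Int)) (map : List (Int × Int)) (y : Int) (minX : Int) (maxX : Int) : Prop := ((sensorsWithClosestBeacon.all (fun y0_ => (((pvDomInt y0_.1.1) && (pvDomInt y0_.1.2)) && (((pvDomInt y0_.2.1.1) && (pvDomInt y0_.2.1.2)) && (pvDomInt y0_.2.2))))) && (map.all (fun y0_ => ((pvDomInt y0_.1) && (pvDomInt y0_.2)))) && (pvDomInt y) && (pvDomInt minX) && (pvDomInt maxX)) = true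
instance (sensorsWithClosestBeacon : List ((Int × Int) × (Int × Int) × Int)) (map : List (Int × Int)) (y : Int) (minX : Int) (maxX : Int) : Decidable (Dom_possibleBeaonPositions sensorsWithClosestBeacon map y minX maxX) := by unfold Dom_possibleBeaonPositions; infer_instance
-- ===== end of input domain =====

-- B replaces A's per-position scan of [minX,maxX] by computing each sensor's covered
-- x-interval on row y, sorting the clipped intervals and emitting the uncovered gaps
-- in one sweep (objective: alternative algorithm, same result).

-- ===== PORT A =====
-- the inner 'for entry in …: possiblePosition = possiblePosition and … ; if not possiblePosition: break' loop
def pvCheckA (map : List (Int × Int)) (pos : Int × Int) : List ((Int × Int) × (Int × Int) × Int) → Bool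
  | [] => true
  | entry :: rest =>
    if |entry.1.1 - pos.1| + |entry.1.2 - pos.2| > entry.2.2 ∧ pos ∉ map then pvCheckA map pos rest
    else false

-- the 'else: for entry in …: if manhattanDistance <= dist and pos not in map: x += …; break' loop
-- (returns the increment applied to x; 0 when no entry fires, as in the Python)
def pvSkipA (map : List (Int × Int)) (pos : Int × Int) (x y : Int) : List ((Int × Int) × (Int × Int) × Int) → Int
  | [] => 0
  | entry :: rest =>
    if |entry.1.1 - pos.1| + |entry.1.2 - pos.2| ≤ entry.2.2 ∧ pos ∉ map then
      entry.2.2 - |y - entry.1.2| - (x - entry.1.1)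
    else pvSkipA map pos x y rest

-- the 'while x <= maxX' loop; fuel only makes the recursion structural (each iteration
-- advances x by at least the +1, so (maxX+1-minX).toNat iterations always suffice)
def pvLoopA (sensors : List ((Int × Int) × (Int × Int) × Int)) (map : List (Int × Int)) (y maxX : Int) : Nat → Int → List (Int × Int) → List (Int × Int)
  | 0, _, result => result
  | fuel+1, x, result =>
    if x ≤ maxX then
      if pvCheckA map (x, y) sensors then
        pvLoopA sensors map y maxX fuel (x + 1) (result ++ [(x, y)])
      else
        pvLoopA sensors map y maxX fuel (x + pvSkipA map (x, y) x y sensors + 1) result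
    else result

def possibleBeaonPositions (sensorsWithClosestBeacon : List ((Int × Int) × (Int × Int) × Int)) (map : List (Int × Int)) (y : Int) (minX : Int) (maxX : Int) : List (Int × Int) :=
  pvLoopA sensorsWithClosestBeacon map y maxX (maxX + 1 - minX).toNat minX []

-- ===== PORT B =====
-- 'span >= 0 and lo <= hi' test for one sensor entry
def pvCondB (y minX maxX : Int) (entry : (Int × Int) × (Int × Int) × Int) : Bool :=
  decide (0 ≤ entry.2.2 - |entry.1.2 - y| ∧
    max (entry.1.1 - (entry.2.2 - |entry.1.2 - y|)) minX ≤ min (entry.1.1 + (entry.2.2 - |entry.1.2 - y|)) maxX)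

-- the clipped interval (lo, hi) for one sensor entry
def pvIvB (y minX maxX : Int) (entry : (Int × Int) × (Int × Int) × Int) : Int × Int :=
  (max (entry.1.1 - (entry.2.2 - |entry.1.2 - y|)) minX, min (entry.1.1 + (entry.2.2 - |entry.1.2 - y|)) maxX)

-- 'for entry in …: … if span >= 0 and lo <= hi: intervals.append((lo, hi))'
def pvIntervalsB (sensors : List ((Int × Int) × (Int × Int) × Int)) (y minX maxX : Int) : List (Int × Int) :=
  sensors.foldl (fun acc e => if pvCondB y minX maxX e then acc ++ [pvIvB y minX maxX e] else acc) []

-- 'for i in range(a, b): if (i, y) not in map: result.append((i, y))'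
def pvEmitB (map : List (Int × Int)) (y a b : Int) (result : List (Int × Int)) : List (Int × Int) :=
  (PySem.List.pyRange a b).foldl (fun r i => if (i, y) ∉ map then r ++ [(i, y)] else r) result

-- 'for lo, hi in intervals: …' sweep, returning the final (x, result)
def pvSweepB (map : List (Int × Int)) (y : Int) : List (Int × Int) → Int → List (Int × Int) → Int × List (Int × Int)
  | [], x, result => (x, result)
  | iv :: rest, x, result =>
    pvSweepB map y rest (if iv.2 + 1 > x then iv.2 + 1 else x)
      (if iv.1 > x then pvEmitB map y x iv.1 result else result)

def possibleBeaonPositions_alt (sensorsWithClosestBeacon : List ((Int × Int) × (Int × Int) × Int)) (map : List (Int × Int)) (y : Int) (minX : Int) (maxX : Int) : List (Int × Int) :=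
  let intervals := PySem.List.sorted2 (pvIntervalsB sensorsWithClosestBeacon y minX maxX) (fun p => p.1) (fun p => p.2)
  let st := pvSweepB map y intervals minX []
  pvEmitB map y st.1 (maxX + 1) st.2

-- ===== PRECONDITION & SPEC =====
-- When sensorsWithClosestBeacon is empty and map contains a point (x,y) with minX ≤ x ≤ maxX,
-- A's per-sensor loop never runs, so A returns every position of the row including known map
-- points, while B still excludes map points — the intended behaviour (known beacons/sensors
-- are not possible beacon positions).
def D_possibleBeaonPositions (sensorsWithClosestBeacon : List ((Int × Int) × (Int × Int) × Int)) (map : List (Int × Int)) (y : Int) (minX : Int) (maxX : Int) : Prop :=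
  sensorsWithClosestBeacon = [] ∧ ∃ p ∈ map, p.2 = y ∧ minX ≤ p.1 ∧ p.1 ≤ maxX
instance (sensorsWithClosestBeacon : List ((Int × Int) × (Int × Int) × Int)) (map : List (Int × Int)) (y : Int) (minX : Int) (maxX : Int) : Decidable (D_possibleBeaonPositions sensorsWithClosestBeacon map y minX maxX) := by unfold D_possibleBeaonPositions; infer_instance

def Spec_possibleBeaonPositions (sensorsWithClosestBeacon : List ((Int × Int) × (Int × Int) × Int)) (map : List (Int × Int)) (y : Int) (minX : Int) (maxX : Int) (out : List (Int × Int)) : Prop := ¬ D_possibleBeaonPositions sensorsWithClosestBeacon map y minX maxX → out = possibleBeaonPositions_alt sensorsWithClosestBeacon map y minX maxX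
instance (sensorsWithClosestBeacon : List ((Int × Int) × (Int × Int) × Int)) (map : List (Int × Int)) (y : Int) (minX : Int) (maxX : Int) (out : List (Int × Int)) : Decidable (Spec_possibleBeaonPositions sensorsWithClosestBeacon map y minX maxX out) := by unfold Spec_possibleBeaonPositions; infer_instance

def pvDiffWitness_possibleBeaonPositions : (List ((Int × Int) × (Int × Int) × Int)) × (List (Int × Int)) × Int × Int × Int := ([], [(0, 0)], 0, 0, 0)
def pvDiffWitnessOut_possibleBeaonPositions : (List (Int × Int)) × (List (Int × Int)) := ([(0, 0)], [])

-- ===== CLAIM (what is proved, stated in full; the proofs are below) =====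
def Claim_unchanged_possibleBeaonPositions : Prop := ∀ (sensorsWithClosestBeacon : List ((Int × Int) × (Int × Int) × Int)) (map : List (Int × Int)) (y : Int) (minX : Int) (maxX : Int), Dom_possibleBeaonPositions sensorsWithClosestBeacon map y minX maxX → Spec_possibleBeaonPositions sensorsWithClosestBeacon map y minX maxX (possibleBeaonPositions sensorsWithClosestBeacon map y minX maxX)
def Claim_changed_possibleBeaonPositions : Prop := Dom_possibleBeaonPositions (pvDiffWitness_possibleBeaonPositions.1) (pvDiffWitness_possibleBeaonPositions.2.1) (pvDiffWitness_possibleBeaonPositions.2.2.1) (pvDiffWitness_possibleBeaonPositions.2.2.2.1) (pvDiffWitness_possibleBeaonPositions.2.2.2.2) ∧ D_possibleBeaonPositions (pvDiffWitness_possibleBeaonPositions.1) (pvDiffWitness_possibleBeaonPositions.2.1) (pvDiffWitness_possibleBeaonPositions.2.2.1) (pvDiffWitness_possibleBeaonPositions.2.2.2.1) (pvDiffWitness_possibleBeaonPositions.2.2.2.2) ∧ possibleBeaonPositions (pvDiffWitness_possibleBeaonPositions.1) (pvDiffWitness_possibleBeaonPositions.2.1) (pvDiffWitness_possibleBeaonPositions.2.2.1)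 (pvDiffWitness_possibleBeaonPositions.2.2.2.1) (pvDiffWitness_possibleBeaonPositions.2.2.2.2) = pvDiffWitnessOut_possibleBeaonPositions.1 ∧ possibleBeaonPositions_alt (pvDiffWitness_possibleBeaonPositions.1) (pvDiffWitness_possibleBeaonPositions.2.1) (pvDiffWitness_possibleBeaonPositions.2.2.1) (pvDiffWitness_possibleBeaonPositions.2.2.2.1) (pvDiffWitness_possibleBeaonPositions.2.2.2.2) = pvDiffWitnessOut_possibleBeaonPositions.2 ∧ pvDiffWitnessOut_possibleBeaonPositions.1 ≠ pvDiffWitnessOut_possibleBeaonPositions.2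
def Claim_exact_possibleBeaonPositions : Prop := ∀ (sensorsWithClosestBeacon : List ((Int × Int) × (Int × Int) × Int)) (map : List (Int × Int)) (y : Int) (minX : Int) (maxX : Int), Dom_possibleBeaonPositions sensorsWithClosestBeacon map y minX maxX → D_possibleBeaonPositions sensorsWithClosestBeacon map y minX maxX → possibleBeaonPositions sensorsWithClosestBeacon map y minX maxX ≠ possibleBeaonPositions_alt sensorsWithClosestBeacon map y minX maxX

-- ===== LEMMAS AND PROOFS =====

theorem pvCheckA_eq_all (map : List (Int × Int)) (pos : Int × Int) (l : List ((Int × Int) × (Int × Int) × Int)) :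
    pvCheckA map pos l = l.all (fun e => decide (|e.1.1 - pos.1| + |e.1.2 - pos.2| > e.2.2 ∧ pos ∉ map)) := by
  induction l with
  | nil => rfl
  | cons e rest ih =>
    simp only [pvCheckA, List.all_cons]
    split_ifs with h <;> simp [h, ih]

theorem pvSkipA_spec (map : List (Int × Int)) (pos : Int × Int) (x y : Int) (l : List ((Int × Int) × (Int × Int) × Int)) :
    pvSkipA map pos x y l = 0 ∨
    ∃ e ∈ l, (|e.1.1 - pos.1| + |e.1.2 - pos.2| ≤ e.2.2 ∧ pos ∉ map) ∧
      pvSkipA map pos x y l = e.2.2 - |y - e.1.2| - (x - e.1.1) := by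
  induction l with
  | nil => left; rfl
  | cons e rest ih =>
    simp only [pvSkipA]
    split_ifs with h
    · right; exact ⟨e, List.mem_cons_self .., h, rfl⟩
    · rcases ih with h0 | ⟨e', he', hc, heq⟩
      · left; exact h0
      · right; exact ⟨e', List.mem_cons_of_mem _ he', hc, heq⟩

-- A's predicate is false on every position a covering sensor reaches

theorem pvCheckA_false_of_covered (sensors : List ((Int × Int) × (Int × Int) × Int))
    (map : List (Int × Int)) (y i : Int) (e : (Int × Int) × (Int × Int) × Int) (he : e ∈ sensors)
    (hcov : |e.1.1 - i| + |e.1.2 - y| ≤ e.2.2) :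
    pvCheckA map (i, y) sensors = false := by
  rw [pvCheckA_eq_all]
  simp only [List.all_eq_false]
  exact ⟨e, he, by simp; intro h; omega⟩

-- positions skipped by the jump are all covered by the firing sensor

theorem pvSkip_covered (sx sy d x y i : Int)
    (hcov : |sx - x| + |sy - y| ≤ d) (hx : x ≤ i) (hi : i ≤ x + (d - |y - sy| - (x - sx))) :
    |sx - i| + |sy - y| ≤ d := by
  have h1 : |sy - y| = |y - sy| := abs_sub_comm _ _
  have h2 : 0 ≤ |y - sy| := abs_nonneg _
  have h3 := abs_le.mp (show |sx - x| ≤ d - |y - sy| by omega)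
  have h4 : |sx - i| ≤ d - |y - sy| := abs_le.mpr (by omega)
  omega

def pvTgtA (sensors : List ((Int × Int) × (Int × Int) × Int)) (map : List (Int × Int)) (y a b : Int) : List (Int × Int) :=
  ((PySem.List.pyRange a b).filter (fun i => pvCheckA map (i, y) sensors)).map (fun i => (i, y))

theorem pvTgtA_shift (sensors) (map : List (Int × Int)) (y x x' b : Int)
    (hle : x ≤ x') (hall : ∀ i, x ≤ i → i < x' → pvCheckA map (i, y) sensors = false) :
    pvTgtA sensors map y x b = pvTgtA sensors map y x' b := by
  unfold pvTgtA
  by_cases hb : x' ≤ b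
  · rw [PySem.List.pyRange_one_append x x' b hle hb, List.filter_append,
      List.filter_eq_nil_iff.mpr (fun i hi => by
        rw [PySem.List.mem_pyRange_one] at hi
        simp [hall i hi.1 hi.2])]
    rfl
  · by_cases hxb : x ≤ b
    · rw [PySem.List.pyRange_one_eq_nil (show b ≤ x' by omega),
        List.filter_eq_nil_iff.mpr (fun i hi => by
          rw [PySem.List.mem_pyRange_one] at hi
          simp [hall i hi.1 (by omega)])]
      rfl
    · rw [PySem.List.pyRange_one_eq_nil (show b ≤ x by omega),
        PySem.List.pyRange_one_eq_nil (show b ≤ x' by omega)]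

theorem pvTgtA_nil (sensors) (map : List (Int × Int)) (y a b : Int) (h : b ≤ a) :
    pvTgtA sensors map y a b = [] := by
  rw [pvTgtA, PySem.List.pyRange_one_eq_nil h]; rfl

theorem pvTgtA_cons_pos (sensors) (map : List (Int × Int)) (y x b : Int) (hx : x < b)
    (hc : pvCheckA map (x, y) sensors = true) :
    pvTgtA sensors map y x b = (x, y) :: pvTgtA sensors map y (x + 1) b := by
  rw [pvTgtA, PySem.List.pyRange_one_cons hx]
  simp [hc, pvTgtA]

theorem pvLoopA_eq (sensors) (map : List (Int × Int)) (y maxX : Int) :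
    ∀ (fuel : Nat) (x : Int) (result : List (Int × Int)), (maxX + 1 - x).toNat ≤ fuel →
      pvLoopA sensors map y maxX fuel x result = result ++ pvTgtA sensors map y x (maxX + 1) := by
  intro fuel
  induction fuel with
  | zero =>
    intro x result h
    rw [pvLoopA, pvTgtA_nil _ _ _ _ _ (by omega)]
    simp
  | succ fuel ih =>
    intro x result h
    rw [pvLoopA]
    by_cases hx : x ≤ maxX
    · rw [if_pos hx]
      have hfuel : (maxX + 1 - (x + 1)).toNat ≤ fuel := by omega
      by_cases hc : pvCheckA map (x, y) sensors
      · rw [if_pos hc, ih (x + 1) _ hfuel, pvTgtA_cons_pos _ _ _ _ _ (by omega) hc]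
        simp
      · rw [if_neg hc]
        rcases pvSkipA_spec map (x, y) x y sensors with h0 | ⟨e, he, ⟨hcov, _⟩, heq⟩
        · rw [h0, show x + 0 + 1 = x + 1 by ring, ih (x + 1) _ hfuel]
          congr 1
          refine (pvTgtA_shift sensors map y x (x + 1) _ (by omega) (fun i h1 h2 => ?_)).symm
          have hix : i = x := by omega
          subst hix; simpa using hc
        · have hcov' : |e.1.1 - x| + |e.1.2 - y| ≤ e.2.2 := hcov
          have hδ : 0 ≤ pvSkipA map (x, y) x y sensors := by
            rw [heq]
            have h1 : |e.1.2 - y| = |y - e.1.2| := abs_sub_comm _ _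
            have h2 := abs_nonneg (e.1.1 - x)
            have h3 := abs_le.mp (show |e.1.1 - x| ≤ e.2.2 - |y - e.1.2| by omega)
            omega
          rw [ih _ _ (by omega)]
          congr 1
          refine (pvTgtA_shift sensors map y x _ _ (by omega) (fun i h1 h2 => ?_)).symm
          refine pvCheckA_false_of_covered sensors map y i e he ?_
          exact pvSkip_covered e.1.1 e.1.2 e.2.2 x y i hcov' h1 (by rw [heq] at h2; omega)
    · rw [if_neg hx, pvTgtA_nil _ _ _ _ _ (by omega)]
      simp

theorem pvIntervalsB_eq (sensors) (y minX maxX : Int) :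
    pvIntervalsB sensors y minX maxX = (sensors.filter (pvCondB y minX maxX)).map (pvIvB y minX maxX) := by
  have := PySem.List.foldl_append_if (pvCondB y minX maxX) (pvIvB y minX maxX) sensors []
  simpa [pvIntervalsB] using this

theorem pvEmitB_eq (map : List (Int × Int)) (y a b : Int) (result : List (Int × Int)) :
    pvEmitB map y a b result
      = result ++ ((PySem.List.pyRange a b).filter (fun i => decide ((i, y) ∉ map))).map (fun i => (i, y)) := by
  have := PySem.List.foldl_append_if (fun i => decide ((i, y) ∉ map)) (fun i => ((i, y) : Int × Int))
    (PySem.List.pyRange a b) result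
  simpa [pvEmitB] using this

-- insertion with a comparison compatible with a transitive relation preserves Pairwise

theorem pvInsertBy_pairwise {α : Type} (before : α → α → Bool) (R : α → α → Prop)
    (htr : ∀ {a b c : α}, R a b → R b c → R a c) (h1 : ∀ a b, before a b = true → R a b) (h2 : ∀ a b, before a b = false → R b a)
    (x : α) (ys : List α) (hp : ys.Pairwise R) : (PySem.List.insertBy before x ys).Pairwise R := by
  induction ys with
  | nil => simp [PySem.List.insertBy]
  | cons z zs ih =>
    rcases List.pairwise_cons.mp hp with ⟨hz, hzs⟩
    rw [PySem.List.insertBy]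
    by_cases hb : before x z
    · rw [if_pos hb]
      refine List.pairwise_cons.mpr ⟨?_, hp⟩
      intro a ha
      rcases List.mem_cons.mp ha with rfl | ha
      · exact h1 _ _ hb
      · exact htr (h1 _ _ hb) (hz a ha)
    · rw [if_neg hb]
      refine List.pairwise_cons.mpr ⟨?_, ih hzs⟩
      intro a ha
      rcases (PySem.List.mem_insertBy _ _ _ _).mp ha with rfl | ha
      · exact h2 _ _ (Bool.not_eq_true _ ▸ hb)
      · exact hz a ha

-- sorted2 by (fst, snd) is in particular sorted by fst

theorem pvSorted2_pairwise_fst (xs : List (Int × Int)) :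
    (PySem.List.sorted2 xs (fun p => p.1) (fun p => p.2)).Pairwise (fun a b => a.1 ≤ b.1) := by
  rw [PySem.List.sorted2]
  simp only [if_neg (by simp : ¬(false = true))]
  generalize hacc : ([] : List (Int × Int)) = acc
  have hp : acc.Pairwise (fun a b : Int × Int => a.1 ≤ b.1) := by rw [← hacc]; simp
  clear hacc
  induction xs generalizing acc with
  | nil => simpa using hp
  | cons x xs ih =>
    rw [List.foldl_cons]
    refine ih _ ?_
    refine pvInsertBy_pairwise _ (fun a b : Int × Int => a.1 ≤ b.1) (fun hab hbc => le_trans hab hbc) ?_ ?_ x acc hp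
    · intro a b hab
      simp only [Bool.or_eq_true, Bool.and_eq_true, decide_eq_true_eq, Bool.not_eq_true',
        decide_eq_false_iff_not] at hab
      rcases hab with h | ⟨h, _⟩
      · exact le_of_lt h
      · omega
    · intro a b hab
      simp only [Bool.or_eq_false_iff, Bool.and_eq_false_iff, decide_eq_false_iff_not,
        Bool.not_eq_false', decide_eq_true_eq] at hab
      omega

def pvQ (L : List (Int × Int)) (map : List (Int × Int)) (y i : Int) : Bool :=
  L.all (fun iv => decide (¬(iv.1 ≤ i ∧ i ≤ iv.2))) && decide ((i, y) ∉ map)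

def pvTgtB (L : List (Int × Int)) (map : List (Int × Int)) (y a b : Int) : List (Int × Int) :=
  ((PySem.List.pyRange a b).filter (pvQ L map y)).map (fun i => (i, y))

theorem pvSweepB_eq (map : List (Int × Int)) (y maxX : Int) :
    ∀ (L : List (Int × Int)) (x : Int) (result : List (Int × Int)),
      (∀ iv ∈ L, iv.1 ≤ iv.2 ∧ iv.2 ≤ maxX) → L.Pairwise (fun a b => a.1 ≤ b.1) →
      pvEmitB map y (pvSweepB map y L x result).1 (maxX + 1) (pvSweepB map y L x result).2
        = result ++ pvTgtB L map y x (maxX + 1) := by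
  intro L
  induction L with
  | nil =>
    intro x result _ _
    rw [pvSweepB, pvEmitB_eq]
    unfold pvTgtB
    have e : List.filter (pvQ [] map y) (PySem.List.pyRange x (maxX + 1))
        = List.filter (fun i => decide ((i, y) ∉ map)) (PySem.List.pyRange x (maxX + 1)) :=
      List.filter_congr (fun i _ => by simp [pvQ])
    rw [e]
  | cons iv rest ih =>
    intro x result hbnd hpair
    obtain ⟨hlohi, hhimax⟩ := hbnd iv (List.mem_cons_self ..)
    have hbnd' : ∀ v ∈ rest, v.1 ≤ v.2 ∧ v.2 ≤ maxX := fun v hv => hbnd v (List.mem_cons_of_mem _ hv)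
    rcases List.pairwise_cons.mp hpair with ⟨hlo, hpair'⟩
    rw [pvSweepB]
    by_cases hgap : iv.1 > x
    · have hx' : iv.2 + 1 > x := by omega
      rw [if_pos hgap, if_pos hx', ih _ _ hbnd' hpair', pvEmitB_eq, List.append_assoc]
      congr 1
      unfold pvTgtB
      rw [PySem.List.pyRange_one_append x iv.1 (maxX + 1) (by omega) (by omega),
        PySem.List.pyRange_one_append iv.1 (iv.2 + 1) (maxX + 1) (by omega) (by omega),
        List.filter_append, List.filter_append, List.map_append, List.map_append]
      have e1 : List.filter (pvQ (iv :: rest) map y) (PySem.List.pyRange x iv.1)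
          = List.filter (fun i => decide ((i, y) ∉ map)) (PySem.List.pyRange x iv.1) := by
        refine List.filter_congr (fun i hi => ?_)
        rw [PySem.List.mem_pyRange_one] at hi
        have hall : ∀ v ∈ iv :: rest, ¬(v.1 ≤ i ∧ i ≤ v.2) := by
          intro v hv
          rcases List.mem_cons.mp hv with rfl | hv
          · omega
          · have := hlo v hv; omega
        have h2 : ((iv :: rest).all (fun v => decide (¬(v.1 ≤ i ∧ i ≤ v.2)))) = true :=
          List.all_eq_true.mpr fun v hv => decide_eq_true (hall v hv)
        rw [pvQ, h2, Bool.true_and]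
      have e2 : List.filter (pvQ (iv :: rest) map y) (PySem.List.pyRange iv.1 (iv.2 + 1)) = [] := by
        refine List.filter_eq_nil_iff.mpr (fun i hi => ?_)
        rw [PySem.List.mem_pyRange_one] at hi
        simp [pvQ, show iv.1 ≤ i ∧ i ≤ iv.2 by omega]
      have e3 : List.filter (pvQ (iv :: rest) map y) (PySem.List.pyRange (iv.2 + 1) (maxX + 1))
          = List.filter (pvQ rest map y) (PySem.List.pyRange (iv.2 + 1) (maxX + 1)) := by
        refine List.filter_congr (fun i hi => ?_)
        rw [PySem.List.mem_pyRange_one] at hi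
        simp [pvQ, show iv.2 < i by omega]
      rw [e1, e2, e3]
      simp
    · rw [if_neg hgap]
      by_cases h2 : iv.2 + 1 > x
      · rw [if_pos h2, ih _ _ hbnd' hpair']
        congr 1
        unfold pvTgtB
        rw [PySem.List.pyRange_one_append x (iv.2 + 1) (maxX + 1) (by omega) (by omega),
          List.filter_append, List.map_append]
        have e1 : List.filter (pvQ (iv :: rest) map y) (PySem.List.pyRange x (iv.2 + 1)) = [] := by
          refine List.filter_eq_nil_iff.mpr (fun i hi => ?_)
          rw [PySem.List.mem_pyRange_one] at hi
          simp [pvQ, show iv.1 ≤ i ∧ i ≤ iv.2 by omega]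
        have e2 : List.filter (pvQ (iv :: rest) map y) (PySem.List.pyRange (iv.2 + 1) (maxX + 1))
            = List.filter (pvQ rest map y) (PySem.List.pyRange (iv.2 + 1) (maxX + 1)) := by
          refine List.filter_congr (fun i hi => ?_)
          rw [PySem.List.mem_pyRange_one] at hi
          simp [pvQ, show iv.2 < i by omega]
        rw [e1, e2]
        simp
      · rw [if_neg h2, ih _ _ hbnd' hpair']
        congr 1
        unfold pvTgtB
        have e : List.filter (pvQ (iv :: rest) map y) (PySem.List.pyRange x (maxX + 1))
            = List.filter (pvQ rest map y) (PySem.List.pyRange x (maxX + 1)) := by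
          refine List.filter_congr (fun i hi => ?_)
          rw [PySem.List.mem_pyRange_one] at hi
          simp [pvQ, show iv.2 < i by omega]
        rw [e]

theorem pvCov_iff (y minX maxX i : Int) (hi1 : minX ≤ i) (hi2 : i ≤ maxX)
    (e : (Int × Int) × (Int × Int) × Int) :
    (pvCondB y minX maxX e = true ∧ (pvIvB y minX maxX e).1 ≤ i ∧ i ≤ (pvIvB y minX maxX e).2)
      ↔ |e.1.1 - i| + |e.1.2 - y| ≤ e.2.2 := by
  constructor
  · rintro ⟨hc, h1, h2⟩
    simp only [pvCondB, decide_eq_true_eq] at hc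
    simp only [pvIvB] at h1 h2
    have h0 := abs_nonneg (e.1.2 - y)
    have h3 : |e.1.1 - i| ≤ e.2.2 - |e.1.2 - y| := abs_le.mpr (by omega)
    omega
  · intro h
    have h0 := abs_nonneg (e.1.1 - i)
    have h1 := abs_nonneg (e.1.2 - y)
    have h2 := abs_le.mp (show |e.1.1 - i| ≤ e.2.2 - |e.1.2 - y| by omega)
    exact ⟨by simp only [pvCondB, decide_eq_true_eq]; omega,
      by simp only [pvIvB]; omega⟩

theorem pvQ_eq_checkA (s : List ((Int × Int) × (Int × Int) × Int)) (m : List (Int × Int))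
    (y minX maxX : Int) (hD : ¬ D_possibleBeaonPositions s m y minX maxX)
    (i : Int) (hi1 : minX ≤ i) (hi2 : i ≤ maxX) :
    pvQ (PySem.List.sorted2 (pvIntervalsB s y minX maxX) (fun p => p.1) (fun p => p.2)) m y i
      = pvCheckA m (i, y) s := by
  have hperm := PySem.List.sorted2_perm (pvIntervalsB s y minX maxX) (fun p => p.1) (fun p => p.2) false
  have hall : ∀ (P : Int × Int → Bool),
      (PySem.List.sorted2 (pvIntervalsB s y minX maxX) (fun p => p.1) (fun p => p.2)).all P
        = (pvIntervalsB s y minX maxX).all P := by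
    intro P
    rw [Bool.eq_iff_iff, List.all_eq_true, List.all_eq_true]
    exact ⟨fun h v hv => h v (hperm.mem_iff.mpr hv), fun h v hv => h v (hperm.mem_iff.mp hv)⟩
  rw [pvQ, hall, pvIntervalsB_eq, pvCheckA_eq_all]
  by_cases hm : (i, y) ∈ m
  · have hne : s ≠ [] := by
      intro hnil
      exact hD ⟨hnil, (i, y), hm, rfl, hi1, hi2⟩
    rcases s with _ | ⟨e, rest⟩
    · exact absurd rfl hne
    · simp [hm]
  · have hmt : decide ((i, y) ∉ m) = true := decide_eq_true hm
    rw [hmt, Bool.and_true]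
    rw [Bool.eq_iff_iff, List.all_eq_true, List.all_eq_true]
    constructor
    · intro h e he
      simp only [decide_eq_true_eq]
      refine ⟨?_, hm⟩
      by_contra hle
      have hcov := (pvCov_iff y minX maxX i hi1 hi2 e).mpr (by
        have : |e.1.1 - (i, y).1| + |e.1.2 - (i, y).2| ≤ e.2.2 := not_lt.mp hle
        exact this)
      have := h (pvIvB y minX maxX e) (List.mem_map.mpr ⟨e, List.mem_filter.mpr ⟨he, hcov.1⟩, rfl⟩)
      simp only [decide_eq_true_eq] at this
      exact this ⟨hcov.2.1, hcov.2.2⟩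
    · intro h v hv
      rcases List.mem_map.mp hv with ⟨e, hef, rfl⟩
      rcases List.mem_filter.mp hef with ⟨he, hcond⟩
      simp only [decide_eq_true_eq]
      intro hcov
      have := (pvCov_iff y minX maxX i hi1 hi2 e).mp ⟨hcond, hcov.1, hcov.2⟩
      have hgt := h e he
      simp only [decide_eq_true_eq] at hgt
      exact absurd this (by
        have : |e.1.1 - (i, y).1| + |e.1.2 - (i, y).2| > e.2.2 := hgt.1
        omega)

theorem pvAlt_eq (s : List ((Int × Int) × (Int × Int) × Int)) (m : List (Int × Int)) (y minX maxX : Int) :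
    possibleBeaonPositions_alt s m y minX maxX
      = pvTgtB (PySem.List.sorted2 (pvIntervalsB s y minX maxX) (fun p => p.1) (fun p => p.2)) m y minX (maxX + 1) := by
  have hperm := PySem.List.sorted2_perm (pvIntervalsB s y minX maxX) (fun p => p.1) (fun p => p.2) false
  have hbnd : ∀ iv ∈ PySem.List.sorted2 (pvIntervalsB s y minX maxX) (fun p => p.1) (fun p => p.2),
      iv.1 ≤ iv.2 ∧ iv.2 ≤ maxX := by
    intro iv hv
    have hv' := hperm.mem_iff.mp hv
    rw [pvIntervalsB_eq] at hv'
    rcases List.mem_map.mp hv' with ⟨e, hef, rfl⟩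
    rcases List.mem_filter.mp hef with ⟨_, hcond⟩
    simp only [pvCondB, decide_eq_true_eq] at hcond
    exact ⟨hcond.2, min_le_right _ _⟩
  have h := pvSweepB_eq m y maxX _ minX [] hbnd (pvSorted2_pairwise_fst _)
  simpa [possibleBeaonPositions_alt] using h

-- ===== VERDICT (by name: the statement is the Claim_ definition above) =====
theorem possibleBeaonPositions_spec : Claim_unchanged_possibleBeaonPositions := by
  intro s m y minX maxX _ hD
  show possibleBeaonPositions s m y minX maxX = possibleBeaonPositions_alt s m y minX maxX
  unfold possibleBeaonPositions
  rw [pvLoopA_eq s m y maxX _ minX [] (le_refl _), List.nil_append, pvAlt_eq]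
  unfold pvTgtA pvTgtB
  congr 1
  refine List.filter_congr (fun i hi => ?_)
  rw [PySem.List.mem_pyRange_one] at hi
  exact (pvQ_eq_checkA s m y minX maxX hD i hi.1 (by omega)).symm

theorem possibleBeaonPositions_changed : Claim_changed_possibleBeaonPositions := by
  unfold Claim_changed_possibleBeaonPositions; decide

theorem possibleBeaonPositions_tight : Claim_exact_possibleBeaonPositions := by
  intro s m y minX maxX _ hD
  obtain ⟨hs, p, hp, hpy, h1, h2⟩ := hD
  subst hs
  obtain ⟨px, py⟩ := p
  simp only at hpy h1 h2
  subst hpy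
  intro heq
  have hA : (px, py) ∈ possibleBeaonPositions [] m py minX maxX := by
    unfold possibleBeaonPositions
    rw [pvLoopA_eq [] m py maxX _ minX [] (le_refl _), List.nil_append]
    unfold pvTgtA
    exact List.mem_map.mpr ⟨px,
      List.mem_filter.mpr ⟨PySem.List.mem_pyRange_one.mpr ⟨h1, by omega⟩, rfl⟩, rfl⟩
  have hB : (px, py) ∉ possibleBeaonPositions_alt [] m py minX maxX := by
    rw [pvAlt_eq]
    unfold pvTgtB
    intro hmem
    rcases List.mem_map.mp hmem with ⟨i, hif, hpe⟩
    have hiy : i = px := ((Prod.mk.injEq _ _ _ _).mp hpe).1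
    rcases List.mem_filter.mp hif with ⟨_, hq⟩
    rw [pvQ, Bool.and_eq_true] at hq
    exact (of_decide_eq_true hq.2) (hiy ▸ hp)
  rw [heq] at hA
  exact hB hA
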